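-- pv_equiv track=rewrite | github.com/JohnDorsey/RelentlessFractals | MatrixMath.py | stagger_out_range
-- ===== SOURCE A (Python) =====
-- import itertools
--
-- def stagger_out_range(start, low_stop, high_stop):
--     if start is None:
--         assert low_stop + 1 < high_stop
--         start = low_stop + 1
--     assert low_stop < start < high_stop
--     yield start
--     for distance in itertools.count(1):
--         high, low = (start+distance, start-distance)
--         if high < high_stop:
--             yield high
--         if low > low_stop:
--             yield low
--         if not (high < high_stop or low > low_stop):
--             return
--     assert False
-- ===== SOURCE B (Python) =====
-- def stagger_out_range(start, low_stop, high_stop):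
--     if start is None:
--         assert low_stop + 1 < high_stop
--         start = low_stop + 1
--     assert low_stop < start < high_stop
--     yield from sorted(range(low_stop + 1, high_stop),
--                       key=lambda x: 2 * abs(x - start) + (x < start))
-- ===== Notes on version B (the rewrite author's own statement) =====
-- stated objective: alternative
-- what changed: Replaces A's unbounded outward-stepping loop with a sort: materialize the open interval (low_stop, high_stop) and sort it by distance from start with the high side first on ties.
import Mathlib
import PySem

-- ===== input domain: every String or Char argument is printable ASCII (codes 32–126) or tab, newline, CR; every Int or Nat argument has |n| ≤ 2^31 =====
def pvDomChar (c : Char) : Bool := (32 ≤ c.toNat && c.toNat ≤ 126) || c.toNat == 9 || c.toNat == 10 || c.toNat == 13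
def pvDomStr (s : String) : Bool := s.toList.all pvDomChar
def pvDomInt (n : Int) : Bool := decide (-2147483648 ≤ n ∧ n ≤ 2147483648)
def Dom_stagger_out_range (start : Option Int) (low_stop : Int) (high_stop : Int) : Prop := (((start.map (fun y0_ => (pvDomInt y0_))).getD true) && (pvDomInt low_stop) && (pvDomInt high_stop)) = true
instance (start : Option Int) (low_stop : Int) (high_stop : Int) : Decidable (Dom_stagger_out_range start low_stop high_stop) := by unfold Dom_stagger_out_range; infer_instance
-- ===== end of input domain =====

-- B replaces A's outward-stepping loop by sorting the open interval (low_stop, high_stop)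
-- by distance from start, high side first on ties (objective: alternative).
-- Both Pythons are generators; the ports return the list of yielded values.

-- ===== PORT A =====
-- the itertools.count(1) loop: at distance d, yield high/low while in bounds, stop when both fail.
-- 'fuel' is only a totality guard: the caller passes more fuel than the loop's remaining iterations.
def staggerLoop (s low_stop high_stop : Int) (fuel : Nat) (d : Int) : List Int :=
  match fuel with
  | 0 => []
  | fuel + 1 =>
    let high := s + d
    let low := s - d
    (if high < high_stop then [high] else []) ++
    (if low > low_stop then [low] else []) ++
    (if high < high_stop ∨ low > low_stop then staggerLoop s low_stop high_stop fuel (d + 1) else [])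

def staggerFuel (s low_stop high_stop : Int) : Nat :=
  (high_stop - s - 1).toNat + (s - 1 - low_stop).toNat + 1

def stagger_out_range (start : Option Int) (low_stop : Int) (high_stop : Int) : List Int :=
  match start with
  | none =>
      -- assert low_stop + 1 < high_stop (raises otherwise; excluded by Pre_)
      if low_stop + 1 < high_stop then
        let s := low_stop + 1
        if low_stop < s ∧ s < high_stop then s :: staggerLoop s low_stop high_stop (staggerFuel s low_stop high_stop) 1 else []
      else []
  | some s =>
      -- assert low_stop < start < high_stop (raises otherwise; excluded by Pre_)
      if low_stop < s ∧ s < high_stop then s :: staggerLoop s low_stop high_stop (staggerFuel s low_stop high_stop) 1 else []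

-- ===== PORT B =====
-- key=lambda x: 2*abs(x - start) + (x < start)
def staggerKey (s x : Int) : Int := 2 * |x - s| + (if x < s then 1 else 0)

def stagger_out_range_alt (start : Option Int) (low_stop : Int) (high_stop : Int) : List Int :=
  match start with
  | none =>
      if low_stop + 1 < high_stop then
        let s := low_stop + 1
        if low_stop < s ∧ s < high_stop then
          PySem.List.sorted (PySem.List.pyRange (low_stop + 1) high_stop 1) (staggerKey s) false
        else []
      else []
  | some s =>
      if low_stop < s ∧ s < high_stop then
        PySem.List.sorted (PySem.List.pyRange (low_stop + 1) high_stop 1) (staggerKey s) false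
      else []

-- ===== PRECONDITION & SPEC =====
-- Pre_ excludes exactly the inputs on which A's asserts raise (both generators raise identically there).
def Pre_stagger_out_range (start : Option Int) (low_stop : Int) (high_stop : Int) : Prop :=
  low_stop < start.getD (low_stop + 1) ∧ start.getD (low_stop + 1) < high_stop
instance (start : Option Int) (low_stop : Int) (high_stop : Int) : Decidable (Pre_stagger_out_range start low_stop high_stop) := by unfold Pre_stagger_out_range; infer_instance

def pvWitness_stagger_out_range : Option Int × Int × Int := (some 5, 1, 9)

def Spec_stagger_out_range (start : Option Int) (low_stop : Int) (high_stop : Int) (out : List Int) : Prop := out = stagger_out_range_alt start low_stop high_stop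
instance (start : Option Int) (low_stop : Int) (high_stop : Int) (out : List Int) : Decidable (Spec_stagger_out_range start low_stop high_stop out) := by unfold Spec_stagger_out_range; infer_instance

-- ===== CLAIM (what is proved, stated in full; the proofs are below) =====
def Claim_equal_stagger_out_range : Prop := ∀ (start : Option Int) (low_stop : Int) (high_stop : Int), Dom_stagger_out_range start low_stop high_stop → Pre_stagger_out_range start low_stop high_stop → Spec_stagger_out_range start low_stop high_stop (stagger_out_range start low_stop high_stop)

-- ===== LEMMAS AND PROOFS =====

-- proof-only helper: the interleaved shape of A's loop output
def roundrobin : List Int → List Int → List Int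
  | [], ys => ys
  | x :: xs, [] => x :: xs
  | x :: xs, y :: ys => x :: y :: roundrobin xs ys

lemma roundrobin_nil_right : ∀ xs : List Int, roundrobin xs [] = xs := by
  intro xs; cases xs <;> rfl

lemma mem_roundrobin {x : Int} : ∀ {xs ys : List Int}, x ∈ roundrobin xs ys ↔ x ∈ xs ∨ x ∈ ys := by
  intro xs
  induction xs with
  | nil => intro ys; simp [roundrobin]
  | cons a as ih =>
      intro ys
      cases ys with
      | nil => simp [roundrobin]
      | cons b bs => simp [roundrobin, ih]; tauto

lemma perm_roundrobin : ∀ (xs ys : List Int), (roundrobin xs ys).Perm (xs ++ ys) := by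
  intro xs
  induction xs with
  | nil => intro ys; simp [roundrobin]
  | cons a as ih =>
      intro ys
      cases ys with
      | nil => simp [roundrobin]
      | cons b bs =>
          show (a :: b :: roundrobin as bs).Perm (a :: (as ++ b :: bs))
          refine (List.Perm.cons a ?_)
          exact (List.Perm.cons b (ih bs)).trans List.perm_middle.symm

lemma staggerLoop_eq_roundrobin (s low_stop high_stop : Int) :
    ∀ (fuel : Nat) (d : Int), (high_stop - s - d).toNat + (s - d - low_stop).toNat < fuel →
      staggerLoop s low_stop high_stop fuel d =
        roundrobin (PySem.List.pyRange (s + d) high_stop 1) (PySem.List.pyRange (s - d) low_stop (-1)) := by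
  intro fuel
  induction fuel with
  | zero =>
      intro d h
      exact absurd h (by omega)
  | succ n ih =>
      intro d h
      rw [staggerLoop]
      by_cases hh : s + d < high_stop
      · rw [PySem.List.pyRange_one_cons hh]
        by_cases hl : s - d > low_stop
        · rw [PySem.List.pyRange_neg_one_cons hl]
          have := ih (d + 1) (by omega)
          simp only [hh, hl, if_pos, or_true, roundrobin]
          simp only [show s + d + 1 = s + (d + 1) by ring, show s - d - 1 = s - (d + 1) by ring] at *
          simp [this]
        · rw [PySem.List.pyRange_neg_one_eq_nil (by omega)]
          have := ih (d + 1) (by omega)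
          rw [PySem.List.pyRange_neg_one_eq_nil (by omega)] at this
          simp only [hh, hl, if_pos, true_or, roundrobin]
          simp only [show s + d + 1 = s + (d + 1) by ring] at *
          rw [this]
          cases hc : PySem.List.pyRange (s + (d + 1)) high_stop 1 <;> simp [roundrobin]
      · rw [PySem.List.pyRange_one_eq_nil (by omega)]
        by_cases hl : s - d > low_stop
        · rw [PySem.List.pyRange_neg_one_cons hl]
          have := ih (d + 1) (by omega)
          rw [PySem.List.pyRange_one_eq_nil (by omega)] at this
          simp only [hh, hl, if_pos, or_true, roundrobin]
          simp only [show s - d - 1 = s - (d + 1) by ring] at *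
          simp [this, roundrobin]
        · rw [PySem.List.pyRange_neg_one_eq_nil (by omega)]
          simp [hh, hl, roundrobin]

lemma staggerKey_high {s x : Int} (h : s ≤ x) : staggerKey s x = 2 * (x - s) := by
  unfold staggerKey
  rw [abs_of_nonneg (by omega), if_neg (by omega)]
  ring

lemma staggerKey_low {s x : Int} (h : x < s) : staggerKey s x = 2 * (s - x) + 1 := by
  unfold staggerKey
  rw [abs_of_neg (by omega), if_pos h]
  ring

-- A's interleave, from distance d on, is strictly increasing under staggerKey
lemma pairwise_roundrobin (s low_stop high_stop : Int) :
    ∀ (fuel : Nat) (d : Int), 1 ≤ d → (high_stop - s - d).toNat + (s - d - low_stop).toNat < fuel →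
      (roundrobin (PySem.List.pyRange (s + d) high_stop 1) (PySem.List.pyRange (s - d) low_stop (-1))).Pairwise
        (fun a b => staggerKey s a < staggerKey s b) := by
  intro fuel
  induction fuel with
  | zero => intro d _ h; exact absurd h (by omega)
  | succ n ih =>
      intro d hd h
      by_cases hh : s + d < high_stop
      · rw [PySem.List.pyRange_one_cons hh]
        by_cases hl : s - d > low_stop
        · rw [PySem.List.pyRange_neg_one_cons hl]
          show ((s + d) :: (s - d) :: roundrobin _ _).Pairwise _
          have hrr := ih (d + 1) (by omega) (by omega)
          simp only [show s + d + 1 = s + (d + 1) by ring, show s - d - 1 = s - (d + 1) by ring]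
          have hbound : ∀ x ∈ roundrobin (PySem.List.pyRange (s + (d + 1)) high_stop 1)
              (PySem.List.pyRange (s - (d + 1)) low_stop (-1)), 2 * (d + 1) ≤ staggerKey s x := by
            intro x hx
            rcases mem_roundrobin.mp hx with hx | hx
            · have := (PySem.List.mem_pyRange_one).mp hx
              rw [staggerKey_high (by omega)]; omega
            · have := (PySem.List.mem_pyRange_neg_one).mp hx
              rw [staggerKey_low (by omega)]; omega
          refine List.Pairwise.cons ?_ (List.Pairwise.cons ?_ hrr)
          · intro b hb
            rw [staggerKey_high (by omega)]
            rcases List.mem_cons.mp hb with rfl | hb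
            · rw [staggerKey_low (by omega)]; omega
            · have := hbound b hb; omega
          · intro b hb
            rw [staggerKey_low (by omega)]
            have := hbound b hb; omega
        · rw [PySem.List.pyRange_neg_one_eq_nil (by omega), roundrobin_nil_right, ← PySem.List.pyRange_one_cons hh]
          refine List.Pairwise.imp_of_mem ?_ (PySem.List.pairwise_lt_pyRange_one (s + d) high_stop)
          intro a b ha hb hab
          have ha' := (PySem.List.mem_pyRange_one).mp ha
          have hb' := (PySem.List.mem_pyRange_one).mp hb
          rw [staggerKey_high (by omega), staggerKey_high (by omega)]
          omega
      · rw [PySem.List.pyRange_one_eq_nil (by omega)]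
        show (roundrobin [] _).Pairwise _
        have hrev := PySem.List.pyRange_neg_one_eq_reverse (a := s - d) (b := low_stop)
        have hpw : (PySem.List.pyRange (s - d) low_stop (-1)).Pairwise (· > ·) := by
          rw [hrev, List.pairwise_reverse]
          simpa using PySem.List.pairwise_lt_pyRange_one (low_stop + 1) (s - d + 1)
        show (PySem.List.pyRange (s - d) low_stop (-1)).Pairwise _
        refine List.Pairwise.imp_of_mem ?_ hpw
        intro a b ha hb hab
        have ha' := (PySem.List.mem_pyRange_neg_one).mp ha
        have hb' := (PySem.List.mem_pyRange_neg_one).mp hb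
        rw [staggerKey_low (by omega), staggerKey_low (by omega)]
        omega

-- A's full output names the sorted order of the interval under staggerKey
lemma sorted_eq_stagger (s low_stop high_stop : Int) (h1 : low_stop < s) (h2 : s < high_stop) :
    PySem.List.sorted (PySem.List.pyRange (low_stop + 1) high_stop 1) (staggerKey s) false =
      s :: staggerLoop s low_stop high_stop (staggerFuel s low_stop high_stop) 1 := by
  rw [staggerLoop_eq_roundrobin s low_stop high_stop _ 1 (by unfold staggerFuel; omega)]
  set H := PySem.List.pyRange (s + 1) high_stop 1 with hH
  set L := PySem.List.pyRange (s - 1) low_stop (-1) with hL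
  refine PySem.List.sorted_eq_of_perm_of_pairwise_lt _ _ (staggerKey s) ?_ ?_
  · -- (s :: roundrobin H L).Perm (pyRange (low_stop+1) high_stop 1)
    have hsplit : PySem.List.pyRange (low_stop + 1) high_stop 1 =
        PySem.List.pyRange (low_stop + 1) s 1 ++ PySem.List.pyRange s high_stop 1 :=
      PySem.List.pyRange_one_append _ _ _ (by omega) (by omega)
    have hcons : PySem.List.pyRange s high_stop 1 = s :: H :=
      PySem.List.pyRange_one_cons h2
    have hLrev : L = (PySem.List.pyRange (low_stop + 1) s 1).reverse := by
      rw [hL, PySem.List.pyRange_neg_one_eq_reverse]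
      norm_num
    have p1 : (s :: roundrobin H L).Perm (s :: (H ++ L)) := List.Perm.cons s (perm_roundrobin H L)
    have p2 : (s :: (H ++ L)).Perm (s :: (L ++ H)) := List.Perm.cons s List.perm_append_comm
    have p3 : (s :: (L ++ H)).Perm (L ++ (s :: H)) := List.perm_middle.symm
    have p4 : (L ++ (s :: H)).Perm (PySem.List.pyRange (low_stop + 1) s 1 ++ (s :: H)) :=
      List.Perm.append_right _ (by rw [hLrev]; exact List.reverse_perm _)
    have := ((p1.trans p2).trans p3).trans p4
    rw [hsplit, hcons]
    exact this
  · -- strictly key-increasing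
    refine List.Pairwise.cons ?_ ?_
    · intro b hb
      have hkey0 : staggerKey s s = 0 := by rw [staggerKey_high le_rfl]; ring
      rw [hkey0]
      rcases mem_roundrobin.mp hb with hb | hb
      · have := (PySem.List.mem_pyRange_one).mp hb
        rw [staggerKey_high (by omega)]; omega
      · have := (PySem.List.mem_pyRange_neg_one).mp hb
        rw [staggerKey_low (by omega)]; omega
    · exact pairwise_roundrobin s low_stop high_stop ((high_stop - s - 1).toNat + (s - 1 - low_stop).toNat + 1) 1 le_rfl (by omega)

-- ===== VERDICT (by name: the statement is the Claim_ definition above) =====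
theorem stagger_out_range_spec : Claim_equal_stagger_out_range := by
  intro start low_stop high_stop _ hpre
  unfold Pre_stagger_out_range at hpre
  unfold Spec_stagger_out_range stagger_out_range stagger_out_range_alt
  cases start with
  | none =>
      simp only [Option.getD_none] at hpre
      rw [if_pos hpre.2]
      simp only [hpre, and_true, if_pos]
      rw [sorted_eq_stagger _ _ _ hpre.1 hpre.2]
  | some s =>
      simp only [Option.getD_some] at hpre
      simp only [hpre, and_self, if_pos]
      rw [sorted_eq_stagger _ _ _ hpre.1 hpre.2]
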